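-- pv_equiv track=rewrite | github.com/rossjjennings/crypto | frieder_luk.py | to_dfl
-- ===== SOURCE A (Python) =====
-- def to_dfl(n):
--     '''
--     Calculate the decimal Frieder-Luk encoding of a positive integer `n`.
--     This consists of four numbers -- the bits of the decimal digit in each
--     position are given by the bits of each consituent integer in the
--     corresponding positions.
--     '''
--     digits = []
--     while n != 0:
--         digits.append(n % 10)
--         n //= 10
--
--     ones = 0
--     twos = 0
--     fours = 0
--     eights = 0
--     for digit in digits[::-1]:
--         ones = 2*ones + digit % 2
--         twos = 2*twos + digit//2 % 2
--         fours = 2*fours + digit//4 % 2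
--         eights = 2*eights + digit//8 % 2
--
--     return ones, twos, fours, eights
-- ===== SOURCE B (Python) =====
-- def to_dfl(n):
--     '''
--     Calculate the decimal Frieder-Luk encoding of a positive integer `n`.
--     Single LSB-first pass: no digit list, no reversal; each digit's bits are
--     added into the four accumulators with a power-of-two weight.
--     '''
--     ones = twos = fours = eights = 0
--     power = 1
--     while n != 0:
--         d = n % 10
--         ones += (d % 2) * power
--         twos += (d // 2 % 2) * power
--         fours += (d // 4 % 2) * power
--         eights += (d // 8 % 2) * power
--         power *= 2
--         n //= 10
--     return ones, twos, fours, eights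
-- ===== Notes on version B (the rewrite author's own statement) =====
-- stated objective: simpler
-- what changed: Replaces A's two phases (build a digit list, then reverse it and fold MSB-first with shift-and-add into four accumulators) by a single LSB-first loop over n that adds each digit's bits times a maintained power-of-two weight, never materialising the digit list.
import Mathlib
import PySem

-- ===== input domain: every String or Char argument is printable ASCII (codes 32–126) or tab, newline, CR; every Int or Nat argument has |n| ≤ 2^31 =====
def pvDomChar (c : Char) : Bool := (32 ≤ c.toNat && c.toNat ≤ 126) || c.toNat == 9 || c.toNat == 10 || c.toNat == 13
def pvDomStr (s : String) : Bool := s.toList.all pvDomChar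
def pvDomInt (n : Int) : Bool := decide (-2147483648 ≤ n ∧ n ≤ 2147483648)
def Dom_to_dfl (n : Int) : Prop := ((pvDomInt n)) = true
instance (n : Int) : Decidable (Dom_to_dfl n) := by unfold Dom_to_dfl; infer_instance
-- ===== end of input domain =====

-- B replaces A's digit-list-then-reversed-fold by one LSB-first loop with a power-of-two weight (simpler, O(1) extra space).

-- ===== PORT A =====
-- `while n != 0: digits.append(n % 10); n //= 10`; the `0 < n` guard only makes
-- the recursion total — Python's loop never terminates for negative n (outside Pre_).
def pvDigits (n : Int) : List Int :=
  if _h : 0 < n then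
    PySem.Int.mod n 10 :: pvDigits (PySem.Int.floordiv n 10)
  else []
termination_by n.toNat
decreasing_by
  rw [PySem.Int.floordiv_eq_ediv_of_pos (by norm_num : (0:Int) < 10)]
  omega

-- the body of `for digit in digits[::-1]: ...`
def pvStep (acc : Int × Int × Int × Int) (digit : Int) : Int × Int × Int × Int :=
  (2 * acc.1 + PySem.Int.mod digit 2,
   2 * acc.2.1 + PySem.Int.mod (PySem.Int.floordiv digit 2) 2,
   2 * acc.2.2.1 + PySem.Int.mod (PySem.Int.floordiv digit 4) 2,
   2 * acc.2.2.2 + PySem.Int.mod (PySem.Int.floordiv digit 8) 2)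

def to_dfl (n : Int) : Int × Int × Int × Int :=
  ((pvDigits n).reverse).foldl pvStep (0, 0, 0, 0)

-- ===== PORT B =====
-- `while n != 0` of Source B; the `0 < n` guard only makes the recursion total
-- (Source B, like A, never terminates for negative n — outside Pre_).
def pvLoopB (n pow ones twos fours eights : Int) : Int × Int × Int × Int :=
  if _h : 0 < n then
    let d := PySem.Int.mod n 10
    pvLoopB (PySem.Int.floordiv n 10) (2 * pow)
      (ones + PySem.Int.mod d 2 * pow)
      (twos + PySem.Int.mod (PySem.Int.floordiv d 2) 2 * pow)
      (fours + PySem.Int.mod (PySem.Int.floordiv d 4) 2 * pow)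
      (eights + PySem.Int.mod (PySem.Int.floordiv d 8) 2 * pow)
  else (ones, twos, fours, eights)
termination_by n.toNat
decreasing_by
  rw [PySem.Int.floordiv_eq_ediv_of_pos (by norm_num : (0:Int) < 10)]
  omega

def to_dfl_alt (n : Int) : Int × Int × Int × Int := pvLoopB n 1 0 0 0 0

-- ===== PRECONDITION & SPEC =====
-- Pre_ excludes negative n, on which the Python A (and B) loops forever (n //= 10 stalls at -1).
def Pre_to_dfl (n : Int) : Prop := 0 ≤ n
instance (n : Int) : Decidable (Pre_to_dfl n) := by unfold Pre_to_dfl; infer_instance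
def pvWitness_to_dfl : Int := 123

def Spec_to_dfl (n : Int) (out : Int × Int × Int × Int) : Prop := out = to_dfl_alt n
instance (n : Int) (out : Int × Int × Int × Int) : Decidable (Spec_to_dfl n out) := by unfold Spec_to_dfl; infer_instance

-- ===== CLAIM (what is proved, stated in full; the proofs are below) =====
def Claim_equal_to_dfl : Prop := ∀ (n : Int), Dom_to_dfl n → Pre_to_dfl n → Spec_to_dfl n (to_dfl n)

-- ===== LEMMAS AND PROOFS =====

-- weighted value of an LSB-first digit list under bit-extractor g
def pvVal (g : Int → Int) : List Int → Int
  | [] => 0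
  | d :: t => g d + 2 * pvVal g t

def pvG1 (d : Int) : Int := PySem.Int.mod d 2
def pvG2 (d : Int) : Int := PySem.Int.mod (PySem.Int.floordiv d 2) 2
def pvG4 (d : Int) : Int := PySem.Int.mod (PySem.Int.floordiv d 4) 2
def pvG8 (d : Int) : Int := PySem.Int.mod (PySem.Int.floordiv d 8) 2

theorem foldA_eq (l : List Int) :
    l.reverse.foldl pvStep (0, 0, 0, 0) =
      (pvVal pvG1 l, pvVal pvG2 l, pvVal pvG4 l, pvVal pvG8 l) := by
  induction l with
  | nil => simp [pvVal]
  | cons d t ih =>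
      simp only [List.reverse_cons, List.foldl_append, List.foldl_cons, List.foldl_nil, ih]
      simp [pvStep, pvVal, pvG1, pvG2, pvG4, pvG8]
      refine ⟨by ring, by ring, by ring, by ring⟩

theorem loopB_eq (n pow o t f e : Int) (hn : 0 ≤ n) :
      pvLoopB n pow o t f e =
        (o + pow * pvVal pvG1 (pvDigits n),
         t + pow * pvVal pvG2 (pvDigits n),
         f + pow * pvVal pvG4 (pvDigits n),
         e + pow * pvVal pvG8 (pvDigits n)) := by
  revert hn
  induction n, pow, o, t, f, e using pvLoopB.induct with
  | case1 n pow o t f e hpos d ih =>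
      intro _
      have h10 : PySem.Int.floordiv n 10 = n / 10 :=
        PySem.Int.floordiv_eq_ediv_of_pos (by norm_num)
      have hn' : 0 ≤ PySem.Int.floordiv n 10 := by rw [h10]; omega
      rw [pvLoopB, dif_pos hpos, pvDigits, dif_pos hpos, ih hn']
      simp only [pvVal, pvG1, pvG2, pvG4, pvG8, d]
      refine Prod.ext (by ring) (Prod.ext (by ring) (Prod.ext (by ring) (by ring)))
  | case2 n pow o t f e hpos =>
      intro _
      rw [pvLoopB, dif_neg hpos, pvDigits, dif_neg hpos]
      simp [pvVal]

-- ===== VERDICT (by name: the statement is the Claim_ definition above) =====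
theorem to_dfl_spec : Claim_equal_to_dfl := by
  intro n _ hpre
  show to_dfl n = to_dfl_alt n
  rw [to_dfl, to_dfl_alt, foldA_eq, loopB_eq n 1 0 0 0 0 hpre]
  ring_nf
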